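-- pv_equiv track=rewrite | github.com/eunwoo-levi/Algorithm-study | 프로그래머스/3/64064. 불량 사용자/불량 사용자.py | solution
-- ===== SOURCE A (Python) =====
-- from itertools import product
-- from collections import defaultdict
--
-- def solution(user_id, banned_id):
--     ban_ids = defaultdict(list)
--
--     for i, ban in enumerate(banned_id):
--         for user in user_id:
--             if isBanned(ban, user):
--                 ban_ids[i].append(user)
--
--     answer = set()
--
--     # 각 banned_id 자리의 후보 리스트를 순서대로 꺼냄
--     candidates = [ban_ids[i] for i in range(len(banned_id))]
--
--     # 각 자리마다 후보 1명씩 뽑는 모든 경우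
--     for users in product(*candidates):
--         # 같은 유저를 중복 선택하면 안 됨
--         if len(set(users)) == len(banned_id):
--             answer.add(frozenset(users))
--
--     return len(answer)
--
-- def isBanned(a, b):
--     if len(a) != len(b):
--         return False
--
--     for i in range(len(a)):
--         if a[i] == '*':
--             continue
--         if a[i] != b[i]:
--             return False
--
--     return True
-- ===== SOURCE B (Python) =====
-- def solution(user_id, banned_id):
--     cands = [[u for u in user_id if matches(b, u)] for b in banned_id]
--     answer = set()
--
--     def dfs(i, used):
--         if i == len(banned_id):
--             answer.add(frozenset(used))
--             return
--         for u in cands[i]: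
--             if u not in used:
--                 used.append(u)
--                 dfs(i + 1, used)
--                 used.pop()
--
--     dfs(0, [])
--     return len(answer)
--
--
-- def matches(p, u):
--     return len(p) == len(u) and all(pc == '*' or pc == uc for pc, uc in zip(p, u))
-- ===== Notes on version B (the rewrite author's own statement) =====
-- stated objective: alternative
-- what changed: Replaces itertools.product over all candidate tuples followed by duplicate filtering with a recursive backtracking dfs over banned-id slots that carries a used-set and prunes repeated users during traversal, collecting distinct frozensets.
import Mathlib
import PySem

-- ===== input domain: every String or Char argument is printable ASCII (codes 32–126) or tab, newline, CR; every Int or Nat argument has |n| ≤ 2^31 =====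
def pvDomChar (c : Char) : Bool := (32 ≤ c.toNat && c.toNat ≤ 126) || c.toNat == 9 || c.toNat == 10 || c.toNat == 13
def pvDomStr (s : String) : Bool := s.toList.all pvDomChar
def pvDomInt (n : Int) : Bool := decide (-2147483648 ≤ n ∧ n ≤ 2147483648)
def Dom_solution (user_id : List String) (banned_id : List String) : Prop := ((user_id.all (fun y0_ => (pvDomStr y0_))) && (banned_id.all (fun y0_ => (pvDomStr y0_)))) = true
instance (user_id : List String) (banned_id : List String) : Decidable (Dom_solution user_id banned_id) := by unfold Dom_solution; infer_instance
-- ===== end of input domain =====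

-- B replaces A's full Cartesian product (generate every tuple, then filter out duplicate users)
-- by a recursive backtracking search that prunes already-used users during traversal; both count
-- the distinct frozensets of chosen users. (objective: alternative algorithm)

-- a frozenset of strings, modelled by its canonical form: the sorted list of its distinct elements
def frozen (xs : List String) : List String :=
  PySem.List.sorted (PySem.Set.ofList xs) (fun x => x) false

-- ===== PORT A =====
-- for i in range(len(a)): a[i]=='*' → continue; a[i]!=b[i] → return False
def isBanned (a : String) (b : String) : Bool :=
  if PySem.Str.len a ≠ PySem.Str.len b then false
  else (PySem.List.pyRange 0 (PySem.Str.len a) 1).all (fun i =>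
    (PySem.List.pyGet? a.toList i == some '*') ||
    (PySem.List.pyGet? a.toList i == PySem.List.pyGet? b.toList i))

-- itertools.product(*ls), in product's (lexicographic, leftmost slowest) order
def prodList (ls : List (List String)) : List (List String) :=
  ls.foldr (fun cs acc => cs.flatMap (fun c => acc.map (c :: ·))) [[]]

def solution (user_id : List String) (banned_id : List String) : Int :=
  let ban_ids : PySem.Dict Int (List String) :=
    (PySem.List.enumerate banned_id 0).foldl (fun d p =>
      user_id.foldl (fun d user =>
        if isBanned p.2 user then d.insert p.1 (d.getD p.1 [] ++ [user]) else d) d)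
      PySem.Dict.empty
  let candidates : List (List String) :=
    (PySem.List.pyRange 0 (banned_id.length : Int) 1).map (fun i => ban_ids.getD i [])
  let answer : PySem.Set (List String) :=
    (prodList candidates).foldl (fun ans users =>
      if (PySem.Set.ofList users).length = banned_id.length
      then PySem.Set.add ans (frozen users) else ans) PySem.Set.empty
  (answer.length : Int)

-- ===== PORT B =====
def matchesB (p : String) (u : String) : Bool :=
  (PySem.Str.len p == PySem.Str.len u) &&
  (p.toList.zip u.toList).all (fun pc => pc.1 == '*' || pc.1 == pc.2)

mutual
-- dfs(i, used): base case adds frozenset(used); otherwise loop over cands[i] skipping used users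
def dfsB : List (List String) → List String → PySem.Set (List String) → PySem.Set (List String)
  | [], used, ans => PySem.Set.add ans (frozen used)
  | cs :: rest, used, ans => dfsRowB cs rest used ans
  termination_by cands _ _ => (cands.length, 0)

-- the 'for u in cands[i]' loop of dfs, as recursion over the row
def dfsRowB : List String → List (List String) → List String → PySem.Set (List String) → PySem.Set (List String)
  | [], _, _, ans => ans
  | u :: cs, rest, used, ans =>
      dfsRowB cs rest used (if used.contains u then ans else dfsB rest (used ++ [u]) ans)
  termination_by cs rest _ _ => (rest.length, cs.length + 1)
end

def solution_alt (user_id : List String) (banned_id : List String) : Int :=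
  let cands : List (List String) := banned_id.map (fun b => user_id.filter (fun u => matchesB b u))
  ((dfsB cands [] PySem.Set.empty).length : Int)

-- ===== PRECONDITION & SPEC =====
def Spec_solution (user_id : List String) (banned_id : List String) (out : Int) : Prop := out = solution_alt user_id banned_id
instance (user_id : List String) (banned_id : List String) (out : Int) : Decidable (Spec_solution user_id banned_id out) := by unfold Spec_solution; infer_instance

-- ===== CLAIM (what is proved, stated in full; the proofs are below) =====
def Claim_equal_solution : Prop := ∀ (user_id : List String) (banned_id : List String), Dom_solution user_id banned_id → Spec_solution user_id banned_id (solution user_id banned_id)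

-- ===== LEMMAS AND PROOFS =====

-- the index-based wildcard loop equals the zip-based one
theorem allIdx : ∀ (as bs : List Char), as.length = bs.length →
    ((List.range as.length).all (fun k => (as[k]? == some '*') || (as[k]? == bs[k]?))
    = (as.zip bs).all (fun pc => pc.1 == '*' || pc.1 == pc.2)) := by
  intro as
  induction as with
  | nil => intro bs h; simp
  | cons x as ih =>
    intro bs h
    cases bs with
    | nil => simp at h
    | cons y bs =>
      have := ih bs (by simpa using h)
      simp only [List.length_cons, List.range_succ_eq_map, List.all_cons, List.all_map,
        List.zip_cons_cons, List.getElem?_cons_zero, Function.comp_def,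
        List.getElem?_cons_succ]
      rw [this]
      simp

-- A's per-index wildcard test equals B's zip-based one
theorem isBanned_eq_matches (a b : String) : isBanned a b = matchesB a b := by
  unfold isBanned matchesB
  by_cases hl : a.toList.length = b.toList.length
  · have hL : a.length = b.length := by
      rw [← String.length_toList, ← String.length_toList, hl]
    rw [if_neg (by simp [hL]), PySem.Str.len_eq a, PySem.List.pyRange_zero_nat, List.all_map]
    simp only [Function.comp_def, PySem.List.pyGet?_natCast]
    rw [allIdx a.toList b.toList hl]
    simp [hL]
  · have hL : a.length ≠ b.length := by
      rw [← String.length_toList, ← String.length_toList]; exact hl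
    rw [if_pos (by simp [hL])]
    simp [hL]

-- the inner 'for user in user_id' loop appends the matching users at key i
theorem inner_getD (us : List String) (p : String → Bool) (i : Int) :
    ∀ (d : PySem.Dict Int (List String)) (j : Int),
    (us.foldl (fun d user => if p user then d.insert i (d.getD i [] ++ [user]) else d) d).getD j []
    = if j = i then d.getD i [] ++ us.filter p else d.getD j [] := by
  induction us with
  | nil =>
    intro d j
    by_cases h : j = i
    · subst h; simp
    · simp [h]
  | cons u us ih =>
    intro d j
    by_cases hp : p u
    · rw [List.foldl_cons, if_pos hp, ih]
      by_cases h : j = i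
      · subst h
        rw [if_pos rfl, if_pos rfl, PySem.Dict.getD_insert_self]
        simp [hp]
      · rw [if_neg h, if_neg h, PySem.Dict.getD_insert, if_neg h]
    · rw [List.foldl_cons, if_neg hp, ih]
      simp [hp]

-- reading the built defaultdict: getD j [] is the candidate list for slot j (and [] off-range)
theorem dict_getD (us : List String) (p : String → String → Bool) :
    ∀ (bs : List String) (s : Int)
    (d : PySem.Dict Int (List String)) (j : Int),
    ((PySem.List.enumerate bs s).foldl (fun d q =>
      us.foldl (fun d user =>
        if p q.2 user then d.insert q.1 (d.getD q.1 [] ++ [user]) else d) d) d).getD j []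
    = if s ≤ j ∧ j < s + bs.length
      then d.getD j [] ++ us.filter (fun u => p (bs.getD (j - s).toNat "") u)
      else d.getD j [] := by
  intro bs
  induction bs with
  | nil =>
    intro s d j
    rw [PySem.List.enumerate_nil, List.foldl_nil, if_neg (by simp only [List.length_nil]; omega)]
  | cons b bs ih =>
    intro s d j
    rw [PySem.List.enumerate_cons, List.foldl_cons, ih]
    by_cases h1 : j = s
    · subst h1
      rw [if_neg (by omega), if_pos (by simp only [List.length_cons]; push_cast; omega),
        inner_getD, if_pos rfl]
      simp
    · by_cases h2 : s + 1 ≤ j ∧ j < s + 1 + bs.length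
      · rw [if_pos h2,
          if_pos (by simp only [List.length_cons] at h2 ⊢; push_cast at h2 ⊢; omega),
          inner_getD, if_neg h1]
        have : (j - s).toNat = (j - (s + 1)).toNat + 1 := by omega
        rw [this, List.getD_cons_succ]
      · rw [if_neg h2,
          if_neg (by simp only [List.length_cons] at h2 ⊢; push_cast at h2 ⊢; omega),
          inner_getD, if_neg h1]

-- every tuple of the product has one entry per list
theorem prodList_length (ls : List (List String)) : ∀ t ∈ prodList ls, t.length = ls.length := by
  induction ls with
  | nil => intro t ht; simp [prodList] at ht; simp [ht]
  | cons cs ls ih =>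
    intro t ht
    simp only [prodList, List.foldr_cons, List.mem_flatMap, List.mem_map] at ht
    obtain ⟨c, _, t', ht', rfl⟩ := ht
    simp [ih t' ht']

-- len(set(xs)) == len(xs) says exactly that xs has no duplicates
theorem nodup_iff_ofList_length (xs : List String) :
    (PySem.Set.ofList xs).length = xs.length ↔ xs.Nodup := by
  constructor
  · induction xs with
    | nil => intro _; exact List.nodup_nil
    | cons x xs ih =>
      intro h
      rw [PySem.Set.ofList_cons] at h
      simp only [List.length_cons, PySem.Set.discard] at h
      have hle : (List.filter (fun y => !y == x) (PySem.Set.ofList xs)).length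
          ≤ (PySem.Set.ofList xs).length := List.length_filter_le _ _
      have hle2 := PySem.Set.length_ofList_le xs
      have hx : x ∉ xs := by
        intro hmem
        have : (List.filter (fun y => !y == x) (PySem.Set.ofList xs)).length
            < (PySem.Set.ofList xs).length := by
          rw [List.length_filter_lt_length_iff_exists]
          exact ⟨x, by simpa [PySem.Set.mem_ofList] using hmem, by simp⟩
        omega
      exact List.Nodup.cons hx (ih (by omega))
  · intro h
    rw [PySem.Set.ofList_eq_self_of_nodup xs h]

-- the DFS equals the filtered-product fold
theorem dfs_eq : ∀ (cands : List (List String)) (used : List String)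
    (ans : PySem.Set (List String)), used.Nodup →
    dfsB cands used ans
      = (prodList cands).foldl (fun a t =>
          if (used ++ t).Nodup then PySem.Set.add a (frozen (used ++ t)) else a) ans := by
  intro cands
  induction cands with
  | nil =>
    intro used ans h
    rw [dfsB]
    simp only [prodList, List.foldr_nil, List.foldl_cons, List.foldl_nil, List.append_nil]
    rw [if_pos h]
  | cons cs rest ih =>
    intro used ans h
    rw [dfsB]
    have hrow : ∀ (cs' : List String) (a : PySem.Set (List String)),
        dfsRowB cs' rest used a
          = cs'.foldl (fun a c => (prodList rest).foldl
              (fun a t => if (used ++ c :: t).Nodup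
                then PySem.Set.add a (frozen (used ++ c :: t)) else a) a) a := by
      intro cs'
      induction cs' with
      | nil => intro a; rw [dfsRowB, List.foldl_nil]
      | cons u cs' ihr =>
        intro a
        rw [dfsRowB, ihr, List.foldl_cons]
        congr 1
        by_cases hu : u ∈ used
        · rw [if_pos (by simpa using hu)]
          refine ((PySem.List.foldl_congr_mem _ _ (fun a _ => a) a ?_).trans
            (PySem.List.foldl_ignore _ _)).symm
          intro acc t _
          rw [if_neg]
          intro hnd
          rw [List.nodup_append] at hnd
          exact hnd.2.2 u hu u (by simp) rfl
        · rw [if_neg (by simpa using hu)]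
          have hnd : (used ++ [u]).Nodup := by
            rw [List.nodup_append]
            exact ⟨h, List.nodup_singleton _, by
              intro a ha b hb
              simp at hb; subst hb
              exact fun e => hu (e ▸ ha)⟩
          rw [ih (used ++ [u]) a hnd]
          apply PySem.List.foldl_congr_mem
          intro acc t _
          simp only [List.append_assoc, List.singleton_append]
    rw [hrow]
    simp only [prodList, List.foldr_cons]
    rw [List.flatMap_def, List.foldl_flatten, List.foldl_map]
    apply PySem.List.foldl_congr_mem
    intro acc c _
    rw [List.foldl_map]

-- A's candidate lists (read back from the defaultdict) are B's filtered lists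
theorem cand_eq (user_id banned_id : List String) :
    (PySem.List.pyRange 0 (banned_id.length : Int) 1).map (fun i =>
      ((PySem.List.enumerate banned_id 0).foldl (fun d p =>
        user_id.foldl (fun d user =>
          if isBanned p.2 user then d.insert p.1 (d.getD p.1 [] ++ [user]) else d) d)
        PySem.Dict.empty).getD i [])
    = banned_id.map (fun b => user_id.filter (fun u => matchesB b u)) := by
  rw [PySem.List.pyRange_zero_nat, List.map_map]
  apply List.ext_getElem (by simp)
  intro k h1 h2
  simp only [List.getElem_map, List.getElem_range, Function.comp_def]
  rw [dict_getD user_id isBanned banned_id 0 PySem.Dict.empty (k : Int),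
    if_pos (by simp at h1; omega)]
  simp only [PySem.Dict.getD_empty, List.nil_append, Int.sub_zero, Int.toNat_natCast]
  have hk : k < banned_id.length := by simpa using h1
  rw [List.getD_eq_getElem banned_id "" hk]
  exact List.filter_congr (fun u _ => isBanned_eq_matches banned_id[k] u)

-- ===== VERDICT (by name: the statement is the Claim_ definition above) =====
theorem solution_spec : Claim_equal_solution := by
  intro user_id banned_id _
  unfold Spec_solution solution solution_alt
  simp only [cand_eq user_id banned_id]
  congr 1
  rw [dfs_eq _ [] PySem.Set.empty List.nodup_nil]
  congr 1
  apply PySem.List.foldl_congr_mem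
  intro acc t ht
  have hlt : t.length = banned_id.length := by
    rw [prodList_length _ t ht]; simp
  simp only [List.nil_append]
  by_cases hnd : t.Nodup
  · rw [if_pos (by rw [← hlt]; exact (nodup_iff_ofList_length t).2 hnd), if_pos hnd]
  · rw [if_neg (by rw [← hlt]; exact fun h => hnd ((nodup_iff_ofList_length t).1 h)),
      if_neg hnd]
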